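-- pv_equiv track=rewrite | github.com/Fondamenti18/fondamenti-di-programmazione | students/AndreaSterbini/homework01/program02.py | convertiMille
-- ===== SOURCE A (Python) =====
-- def convertiMille(N):
--     numeri = {  0:  '',
--                 1:  'uno',
--                 2:  'due',
--                 3:  'tre',
--                 4:  'quattro',
--                 5:  'cinque',
--                 6:  'sei',
--                 7:  'sette',
--                 8:  'otto',
--                 9:  'nove',
--                 10: 'dieci',
--                 11: 'undici',
--                 12: 'dodici',
--                 13: 'tredici',
--                 14: 'quattordici',
--                 15: 'quindici',
--                 16: 'sedici',
--                 17: 'diciassette',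
--                 18: 'diciotto',
--                 19: 'diciannove',
--                 20: 'venti',
--                 30: 'trenta',
--                 40: 'quaranta',
--                 50: 'cinquanta',
--                 60: 'sessanta',
--                 70: 'settanta',
--                 80: 'ottanta',
--                 90: 'novanta',
--                 100: 'cento',
--                 }
--     elisioni = { 'ottantau'     : 'ottantu',
--                  'antao'        : 'anto',
--                  'entao'        : 'ento',
--                  'entio'        : 'ento',
--                  'antau'        : 'antu',
--                  'entau'        : 'entu',
--                  'entiu'        : 'entu',
--                  'centoottant'  : 'centottant',
--                 }
--     res = ''
--     C = N // 100
--     N %= 100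
--     if C:   res += numeri[C] + 'cento'
--     for d in sorted(numeri.keys(), reverse=True):
--         if N >= d:
--             res += numeri[d]
--             N -= d
--     for k, v  in elisioni.items():
--         res = res.replace(k,v)
--     return res
-- ===== SOURCE B (Python) =====
-- def convertiMille(N):
--     unita = ['', 'uno', 'due', 'tre', 'quattro', 'cinque', 'sei', 'sette', 'otto', 'nove']
--     teens = ['dieci', 'undici', 'dodici', 'tredici', 'quattordici', 'quindici',
--              'sedici', 'diciassette', 'diciotto', 'diciannove']
--     decine = ['', '', 'venti', 'trenta', 'quaranta', 'cinquanta', 'sessanta',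
--               'settanta', 'ottanta', 'novanta']
--
--     def parola(n):  # word for any key of A's numeri table (0-19, multiples of 10, 100)
--         if n == 100:
--             return 'cento'
--         if n >= 20:
--             return decine[n // 10]
--         if n >= 10:
--             return teens[n - 10]
--         return unita[n]
--
--     C, n = divmod(N, 100)
--     d, u = divmod(n, 10)
--     res = ''
--     if C:
--         # 'cento' elides its final o before 'ottant...'
--         res = parola(C) + ('cent' if d == 8 else 'cento')
--     if d >= 2:
--         t = decine[d]
--         # tens words elide their final vowel before 'uno' and 'otto'
--         res += (t[:-1] if u in (1, 8) else t) + unita[u]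
--     elif d == 1:
--         res += teens[u]
--     else:
--         res += unita[u]
--     return res
-- ===== Notes on version B (the rewrite author's own statement) =====
-- stated objective: simpler
-- what changed: Replaces A's dict tables, sorted-keys greedy-subtraction loop and global string-replacement elision pass with direct divmod digit extraction, positional word lists and elisions applied only at the two junctions (tens+unit, cento+ottanta) where they can occur.
import Mathlib
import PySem

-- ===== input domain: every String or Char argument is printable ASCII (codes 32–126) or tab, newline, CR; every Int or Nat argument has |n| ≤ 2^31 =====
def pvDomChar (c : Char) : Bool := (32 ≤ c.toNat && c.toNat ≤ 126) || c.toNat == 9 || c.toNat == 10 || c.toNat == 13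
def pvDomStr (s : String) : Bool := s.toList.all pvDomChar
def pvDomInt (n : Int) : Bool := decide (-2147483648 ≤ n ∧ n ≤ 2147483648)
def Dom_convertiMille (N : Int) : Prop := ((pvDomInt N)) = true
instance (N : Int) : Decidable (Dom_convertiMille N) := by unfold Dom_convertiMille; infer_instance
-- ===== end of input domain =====

-- B drops A's dict tables, the sorted-keys greedy-subtraction loop and the global
-- string-replacement elision pass, and instead extracts hundreds/tens/units digits with
-- divmod, looks the words up in positional lists and applies the elisions at the two
-- junctions where they can occur; objective: simpler.

-- ===== PORT A =====
-- A's numeri dict, verbatim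
def numeriD : PySem.Dict Int String := PySem.Dict.ofList
  [(0, ""), (1, "uno"), (2, "due"), (3, "tre"), (4, "quattro"), (5, "cinque"),
   (6, "sei"), (7, "sette"), (8, "otto"), (9, "nove"), (10, "dieci"),
   (11, "undici"), (12, "dodici"), (13, "tredici"), (14, "quattordici"),
   (15, "quindici"), (16, "sedici"), (17, "diciassette"), (18, "diciotto"),
   (19, "diciannove"), (20, "venti"), (30, "trenta"), (40, "quaranta"),
   (50, "cinquanta"), (60, "sessanta"), (70, "settanta"), (80, "ottanta"),
   (90, "novanta"), (100, "cento")]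

-- A's elisioni dict (as its insertion-ordered item list)
def elisioniL : List (String × String) :=
  [("ottantau", "ottantu"), ("antao", "anto"), ("entao", "ento"),
   ("entio", "ento"), ("antau", "antu"), ("entau", "entu"),
   ("entiu", "entu"), ("centoottant", "centottant")]

-- numeri[d]: inside Pre_ every lookup hits a present key (Python raises KeyError otherwise; those inputs are outside Pre_)
def numAt (d : Int) : String := PySem.Dict.getD numeriD d ""

-- port of A: greedy subtraction over the keys sorted in reverse, then the replace pass
def convertiMille (N : Int) : String :=
  let C := PySem.Int.floordiv N 100
  let n := PySem.Int.mod N 100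
  let res : String := if C ≠ 0 then numAt C ++ "cento" else ""
  let st := (PySem.List.sorted numeriD.keys (fun x => x) true).foldl
      (fun (st : String × Int) d => if st.2 ≥ d then (st.1 ++ numAt d, st.2 - d) else st)
      (res, n)
  elisioniL.foldl (fun r kv => PySem.Str.replace r kv.1 kv.2) st.1

-- ===== PORT B =====
def unitaL : List String :=
  ["", "uno", "due", "tre", "quattro", "cinque", "sei", "sette", "otto", "nove"]
def teensL : List String :=
  ["dieci", "undici", "dodici", "tredici", "quattordici", "quindici",
   "sedici", "diciassette", "diciotto", "diciannove"]
def decineL : List String :=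
  ["", "", "venti", "trenta", "quaranta", "cinquanta", "sessanta",
   "settanta", "ottanta", "novanta"]

-- Source B's parola: word for any key of A's numeri table; the .getD "" marks the
-- out-of-range list index where Python raises IndexError (outside Pre_)
def parola (n : Int) : String :=
  if n = 100 then "cento"
  else if n ≥ 20 then (PySem.List.pyGet? decineL (PySem.Int.floordiv n 10)).getD ""
  else if n ≥ 10 then (PySem.List.pyGet? teensL (n - 10)).getD ""
  else (PySem.List.pyGet? unitaL n).getD ""

def convertiMille_alt (N : Int) : String :=
  let dm := (PySem.Int.divmod? N 100).getD (0, 0)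
  let C := dm.1
  let du := (PySem.Int.divmod? dm.2 10).getD (0, 0)
  let d := du.1
  let u := du.2
  let res : String :=
    if C ≠ 0 then parola C ++ (if d = 8 then "cent" else "cento") else ""
  if d ≥ 2 then
    let t := (PySem.List.pyGet? decineL d).getD ""
    res ++ (if u = 1 ∨ u = 8 then PySem.Str.slice t none (some (-1)) else t)
        ++ (PySem.List.pyGet? unitaL u).getD ""
  else if d = 1 then res ++ (PySem.List.pyGet? teensL u).getD ""
  else res ++ (PySem.List.pyGet? unitaL u).getD ""

-- ===== PRECONDITION & SPEC =====
-- Pre_ is exactly where Python A returns: N // 100 must be a key of the numeri table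
-- (else numeri[C] raises KeyError; negative N always has C ≤ -1)
def Pre_convertiMille (N : Int) : Prop :=
  PySem.Int.floordiv N 100 ∈
    ([0, 1, 2, 3, 4, 5, 6, 7, 8, 9, 10, 11, 12, 13, 14, 15, 16, 17, 18, 19, 20,
      30, 40, 50, 60, 70, 80, 90, 100] : List Int)
instance (N : Int) : Decidable (Pre_convertiMille N) := by unfold Pre_convertiMille; infer_instance

def pvWitness_convertiMille : Int := (187)

def Spec_convertiMille (N : Int) (out : String) : Prop := out = convertiMille_alt N
instance (N : Int) (out : String) : Decidable (Spec_convertiMille N out) := by unfold Spec_convertiMille; infer_instance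

-- ===== CLAIM (what is proved, stated in full; the proofs are below) =====
def Claim_equal_convertiMille : Prop := ∀ (N : Int), Dom_convertiMille N → Pre_convertiMille N → Spec_convertiMille N (convertiMille N)

-- ===== LEMMAS AND PROOFS =====

-- A's and B's bodies as functions of the hundreds quotient and the residue
def Acore (C n : Int) : String :=
  let res : String := if C ≠ 0 then numAt C ++ "cento" else ""
  let st := (PySem.List.sorted numeriD.keys (fun x => x) true).foldl
      (fun (st : String × Int) d => if st.2 ≥ d then (st.1 ++ numAt d, st.2 - d) else st)
      (res, n)
  elisioniL.foldl (fun r kv => PySem.Str.replace r kv.1 kv.2) st.1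

def Bcore (C n : Int) : String :=
  let du := (PySem.Int.divmod? n 10).getD (0, 0)
  let d := du.1
  let u := du.2
  let res : String :=
    if C ≠ 0 then parola C ++ (if d = 8 then "cent" else "cento") else ""
  if d ≥ 2 then
    let t := (PySem.List.pyGet? decineL d).getD ""
    res ++ (if u = 1 ∨ u = 8 then PySem.Str.slice t none (some (-1)) else t)
        ++ (PySem.List.pyGet? unitaL u).getD ""
  else if d = 1 then res ++ (PySem.List.pyGet? teensL u).getD ""
  else res ++ (PySem.List.pyGet? unitaL u).getD ""

theorem A_factor (N : Int) :
    convertiMille N = Acore (PySem.Int.floordiv N 100) (PySem.Int.mod N 100) := rfl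

theorem B_factor (N : Int) :
    convertiMille_alt N = Bcore (PySem.Int.floordiv N 100) (PySem.Int.mod N 100) := by
  have h : PySem.Int.divmod? N 100 = some (PySem.Int.floordiv N 100, PySem.Int.mod N 100) := by
    simp [PySem.Int.divmod?, PySem.Int.floordiv, PySem.Int.mod]
  unfold convertiMille_alt Bcore
  rw [h]
  rfl

-- the greedy loop only appends: its string result factors as initial ++ (loop from "")
theorem greedy_factor (ks : List Int) (r : String) (n : Int) :
    (ks.foldl (fun (st : String × Int) d => if st.2 ≥ d then (st.1 ++ numAt d, st.2 - d) else st) (r, n)).1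
      = r ++ (ks.foldl (fun (st : String × Int) d => if st.2 ≥ d then (st.1 ++ numAt d, st.2 - d) else st) ("", n)).1 := by
  induction ks generalizing r n with
  | nil => simp
  | cons k t ih =>
    simp only [List.foldl_cons]
    by_cases h : n ≥ k
    · simp only [if_pos h]
      rw [ih (r ++ numAt k), ih ("" ++ numAt k)]
      simp [String.append_assoc]
    · simp only [if_neg h]
      exact ih r n

-- staging functions for A's pipeline
def glowS (n : Int) : String :=
  ((PySem.List.sorted numeriD.keys (fun x => x) true).foldl
      (fun (st : String × Int) d => if st.2 ≥ d then (st.1 ++ numAt d, st.2 - d) else st)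
      ("", n)).1
def hundS (C : Int) : String := if C ≠ 0 then numAt C ++ "cento" else ""
def elfoldS (s : String) : String := elisioniL.foldl (fun r kv => PySem.Str.replace r kv.1 kv.2) s

theorem Acore_eq (C n : Int) : Acore C n = elfoldS (hundS C ++ glowS n) := by
  have key := greedy_factor (PySem.List.sorted numeriD.keys (fun x => x) true) (hundS C) n
  calc Acore C n
      = elfoldS (((PySem.List.sorted numeriD.keys (fun x => x) true).foldl
          (fun (st : String × Int) d => if st.2 ≥ d then (st.1 ++ numAt d, st.2 - d) else st)
          (hundS C, n)).1) := rfl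
    _ = elfoldS (hundS C ++ (((PySem.List.sorted numeriD.keys (fun x => x) true).foldl
          (fun (st : String × Int) d => if st.2 ≥ d then (st.1 ++ numAt d, st.2 - d) else st)
          ("", n)).1)) := by rw [key]
    _ = elfoldS (hundS C ++ glowS n) := rfl


def lowTab : List String := ["", "uno", "due", "tre", "quattro", "cinque", "sei", "sette", "otto", "nove", "dieci", "undici", "dodici", "tredici", "quattordici", "quindici", "sedici", "diciassette", "diciotto", "diciannove", "venti", "ventiuno", "ventidue", "ventitre", "ventiquattro", "venticinque", "ventisei", "ventisette", "ventiotto", "ventinove", "trenta", "trentauno", "trentadue", "trentatre", "trentaquattro", "trentacinque", "trentasei", "trentasette", "trentaotto", "trentanove", "quaranta", "quarantauno", "quarantadue", "quarantatre", "quarantaquattro", "quarantacinque", "quarantasei", "quarantasette", "quarantaotto", "quarantanove", "cinquanta", "cinquantauno", "cinquantadue", "cinquantatre", "cinquantaquattro", "cinquantacinque", "cinquantasei", "cinquantasette", "cinquantaotto", "cinquantanove", "sessanta", "sessantauno", "sessantadue", "sessantatre", "sessantaquattro", "sessantacinque", "sessantasei", "sessantasette", "sessantaotto", "sessantanove", "settanta",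 "settantauno", "settantadue", "settantatre", "settantaquattro", "settantacinque", "settantasei", "settantasette", "settantaotto", "settantanove", "ottanta", "ottantauno", "ottantadue", "ottantatre", "ottantaquattro", "ottantacinque", "ottantasei", "ottantasette", "ottantaotto", "ottantanove", "novanta", "novantauno", "novantadue", "novantatre", "novantaquattro", "novantacinque", "novantasei", "novantasette", "novantaotto", "novantanove"]

def centoOutTab : List String := ["cento", "centouno", "centodue", "centotre", "centoquattro", "centocinque", "centosei", "centosette", "centootto", "centonove", "centodieci", "centoundici", "centododici", "centotredici", "centoquattordici", "centoquindici", "centosedici", "centodiciassette", "centodiciotto", "centodiciannove", "centoventi", "centoventuno", "centoventidue", "centoventitre", "centoventiquattro", "centoventicinque", "centoventisei", "centoventisette", "centoventotto", "centoventinove", "centotrenta", "centotrentuno", "centotrentadue", "centotrentatre", "centotrentaquattro", "centotrentacinque", "centotrentasei", "centotrentasette", "centotrentotto", "centotrentanove", "centoquaranta", "centoquarantuno", "centoquarantadue", "centoquarantatre", "centoquarantaquattro", "centoquarantacinque", "centoquarantasei", "centoquarantasette", "centoquarantotto", "centoquarantanove", "centocinquanta", "centocinquantuno", "centocinquantadue",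 "centocinquantatre", "centocinquantaquattro", "centocinquantacinque", "centocinquantasei", "centocinquantasette", "centocinquantotto", "centocinquantanove", "centosessanta", "centosessantuno", "centosessantadue", "centosessantatre", "centosessantaquattro", "centosessantacinque", "centosessantasei", "centosessantasette", "centosessantotto", "centosessantanove", "centosettanta", "centosettantuno", "centosettantadue", "centosettantatre", "centosettantaquattro", "centosettantacinque", "centosettantasei", "centosettantasette", "centosettantotto", "centosettantanove", "centottanta", "centottantuno", "centottantadue", "centottantatre", "centottantaquattro", "centottantacinque", "centottantasei", "centottantasette", "centottantotto", "centottantanove", "centonovanta", "centonovantuno", "centonovantadue", "centonovantatre", "centonovantaquattro", "centonovantacinque", "centonovantasei", "centonovantasette", "centonovantotto", "centonovantanove"]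

def lowOutTab : List String := ["", "uno", "due", "tre", "quattro", "cinque", "sei", "sette", "otto", "nove", "dieci", "undici", "dodici", "tredici", "quattordici", "quindici", "sedici", "diciassette", "diciotto", "diciannove", "venti", "ventuno", "ventidue", "ventitre", "ventiquattro", "venticinque", "ventisei", "ventisette", "ventotto", "ventinove", "trenta", "trentuno", "trentadue", "trentatre", "trentaquattro", "trentacinque", "trentasei", "trentasette", "trentotto", "trentanove", "quaranta", "quarantuno", "quarantadue", "quarantatre", "quarantaquattro", "quarantacinque", "quarantasei", "quarantasette", "quarantotto", "quarantanove", "cinquanta", "cinquantuno", "cinquantadue", "cinquantatre", "cinquantaquattro", "cinquantacinque", "cinquantasei", "cinquantasette", "cinquantotto", "cinquantanove", "sessanta", "sessantuno", "sessantadue", "sessantatre", "sessantaquattro", "sessantacinque", "sessantasei", "sessantasette", "sessantotto", "sessantanove", "settanta", "settantuno", "settantadue", "settantatre", "settantaquattro", "settantacinque", "settantasei", "settantasette", "settantotto", "settantanove", "ottanta", "ottantuno", "ottantadue", "ottantatre", "ottantaquattro", "ottantacinque", "ottantasei", "ottantasette", "ottantotto", "ottantanove", "novanta", "novantuno", "novantadue",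 "novantatre", "novantaquattro", "novantacinque", "novantasei", "novantasette", "novantotto", "novantanove"]

-- greedy low part (pre-elision) agrees with the table
set_option maxRecDepth 100000 in
set_option maxHeartbeats 1000000 in
theorem glow_tab : ∀ m : Fin 100, glowS ((m : Nat) : Int) = lowTab.getD (m : Nat) "" := by decide

-- character-level elision machinery
def centoL : List Char := ['c', 'e', 'n', 't', 'o']
def patsC : List (List Char × List Char) :=
  elisioniL.map (fun kv => (kv.1.toList, kv.2.toList))
def elfoldC (l : List Char) : List Char :=
  patsC.foldl (fun r kv => PySem.Chars.replace r kv.1 kv.2) l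

theorem centoS : "cento".toList = centoL := by decide

theorem elfold_bridge (s : String) : elfoldS s = String.ofList (elfoldC s.toList) := by
  simp [elfoldS, elfoldC, patsC, elisioniL, PySem.Str.replace]

-- replace.go equations
theorem go_zero (old new l acc : List Char) :
    PySem.Chars.replace.go old new 0 l acc = acc.reverse ++ l := by
  unfold PySem.Chars.replace.go; rfl

theorem go_succ_nil (old new acc : List Char) (f : Nat) :
    PySem.Chars.replace.go old new (f + 1) [] acc = acc.reverse := by
  unfold PySem.Chars.replace.go; rfl

theorem go_succ_cons (old new acc t : List Char) (c : Char) (f : Nat) :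
    PySem.Chars.replace.go old new (f + 1) (c :: t) acc =
      if old.isPrefixOf (c :: t) then
        PySem.Chars.replace.go old new f (List.drop old.length (c :: t)) (new.reverse ++ acc)
      else PySem.Chars.replace.go old new f t (c :: acc) := by
  conv_lhs => unfold PySem.Chars.replace.go

theorem go_acc (old new : List Char) (fuel : Nat) :
    ∀ (s acc : List Char), PySem.Chars.replace.go old new fuel s acc =
      acc.reverse ++ PySem.Chars.replace.go old new fuel s [] := by
  induction fuel with
  | zero => intro s acc; simp [go_zero]
  | succ f ih =>
    intro s acc
    cases s with
    | nil => simp [go_succ_nil]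
    | cons c t =>
      rw [go_succ_cons, go_succ_cons]
      by_cases hp : old.isPrefixOf (c :: t)
      · rw [if_pos hp, if_pos hp, ih _ (new.reverse ++ acc), ih _ (new.reverse ++ [])]
        simp
      · rw [if_neg hp, if_neg hp, ih t (c :: acc), ih t [c]]
        simp

theorem go_skip (old new : List Char) :
    ∀ (x y acc : List Char) (k : Nat),
      (∀ i, i < x.length → ¬ (old.isPrefixOf (x.drop i ++ y) = true)) →
      PySem.Chars.replace.go old new (x.length + k) (x ++ y) acc =
        PySem.Chars.replace.go old new k y (x.reverse ++ acc) := by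
  intro x
  induction x with
  | nil => intro y acc k _; simp
  | cons c t ih =>
    intro y acc k h
    have hfuel : (c :: t).length + k = (t.length + k) + 1 := by simp; omega
    rw [hfuel]
    have hcons : (c :: t) ++ y = c :: (t ++ y) := rfl
    rw [hcons, go_succ_cons]
    have h0 : ¬ (old.isPrefixOf (c :: (t ++ y)) = true) := by
      have := h 0 (by simp)
      simpa using this
    rw [if_neg h0]
    have ht := ih y (c :: acc) k (fun i hi => by
      have := h (i + 1) (by simp; omega)
      simpa using this)
    rw [ht]
    simp

theorem rep_append (old new x y : List Char) (hold : old ≠ [])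
    (h : ∀ i, i < x.length → ¬ (old.isPrefixOf (x.drop i ++ y) = true)) :
    PySem.Chars.replace (x ++ y) old new = x ++ PySem.Chars.replace y old new := by
  unfold PySem.Chars.replace
  have he : old.isEmpty = false := by simpa [List.isEmpty_iff] using hold
  rw [he]
  simp only [Bool.false_eq_true, if_false, List.length_append]
  rw [go_skip old new x y [] y.length h, go_acc old new y.length y (x.reverse ++ [])]
  simp

theorem take_prefix_of_prefix_append (old a z : List Char) (h : old <+: a ++ z) :
    old.take a.length <+: a := by
  have h1 : old.take a.length <+: a ++ z := (List.take_prefix _ _).trans h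
  have h2 : old.take a.length <+: (a ++ z).take a.length :=
    List.prefix_take_iff.mpr ⟨h1, by simp⟩
  simpa using h2

-- window check: no elision pattern can start inside w when w is followed by 'cento'…
def windowOK1 (w : List Char) (kv : List Char × List Char) : Bool :=
  (!kv.1.isEmpty) &&
    (List.range w.length).all
      (fun i => !((kv.1.take (w.length - i + 5)).isPrefixOf (w.drop i ++ centoL)))

-- every intermediate string of the elision pass still starts with 'cento'
def startsChain : List (List Char × List Char) → List Char → Bool
  | [], _ => true
  | kv :: ps, y => centoL.isPrefixOf y && startsChain ps (PySem.Chars.replace y kv.1 kv.2)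

theorem fold_peel (w : List Char) :
    ∀ (ps : List (List Char × List Char)) (y : List Char),
      ps.all (fun kv => windowOK1 w kv) = true →
      startsChain ps y = true →
      ps.foldl (fun r kv => PySem.Chars.replace r kv.1 kv.2) (w ++ y) =
        w ++ ps.foldl (fun r kv => PySem.Chars.replace r kv.1 kv.2) y := by
  intro ps
  induction ps with
  | nil => intro y _ _; rfl
  | cons kv ps ih =>
    intro y hall hchain
    rw [List.all_cons, Bool.and_eq_true] at hall
    obtain ⟨hkv, hrest⟩ := hall
    rw [startsChain, Bool.and_eq_true] at hchain
    obtain ⟨hy, hchain'⟩ := hchain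
    rw [windowOK1, Bool.and_eq_true] at hkv
    obtain ⟨hne, hwin⟩ := hkv
    have hold : kv.1 ≠ [] := by simpa [List.isEmpty_iff] using hne
    obtain ⟨z, hz⟩ := List.isPrefixOf_iff_prefix.mp hy
    have hstep : PySem.Chars.replace (w ++ y) kv.1 kv.2 = w ++ PySem.Chars.replace y kv.1 kv.2 := by
      apply rep_append _ _ _ _ hold
      intro i hi hpref
      have hp : kv.1 <+: (w.drop i ++ centoL) ++ z := by
        rw [List.append_assoc, hz]
        exact List.isPrefixOf_iff_prefix.mp hpref
      have htk := take_prefix_of_prefix_append _ _ _ hp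
      have hlen : (w.drop i ++ centoL).length = w.length - i + 5 := by
        simp [centoL]
      rw [hlen] at htk
      have hwin' := List.all_eq_true.mp hwin i (List.mem_range.mpr hi)
      simp only [Bool.not_eq_eq_eq_not, Bool.not_true] at hwin'
      rw [← List.isPrefixOf_iff_prefix] at htk
      simp [htk] at hwin'
    rw [List.foldl_cons, List.foldl_cons, hstep]
    exact ih (PySem.Chars.replace y kv.1 kv.2) hrest hchain'

def keys28 : List Int :=
  [1, 2, 3, 4, 5, 6, 7, 8, 9, 10, 11, 12, 13, 14, 15, 16, 17, 18, 19, 20,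
   30, 40, 50, 60, 70, 80, 90, 100]

set_option maxRecDepth 100000 in
set_option maxHeartbeats 1000000 in
theorem ne0 : ∀ C ∈ keys28, C ≠ 0 := by decide

set_option maxRecDepth 100000 in
set_option maxHeartbeats 1000000 in
theorem windowAll : ∀ C ∈ keys28, patsC.all (fun kv => windowOK1 (numAt C).toList kv) = true := by
  decide

-- the elision chain on 'cento' ++ low: invariant and final value (heavy finite check)
set_option maxRecDepth 100000 in
set_option maxHeartbeats 4000000 in
theorem chain_cento : ∀ m : Fin 100,
    (startsChain patsC (centoL ++ (lowTab.getD (m : Nat) "").toList)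
      && (elfoldC (centoL ++ (lowTab.getD (m : Nat) "").toList)
            == (centoOutTab.getD (m : Nat) "").toList)) = true := by decide

set_option maxRecDepth 100000 in
set_option maxHeartbeats 4000000 in
theorem low_out : ∀ m : Fin 100,
    elfoldC ((lowTab.getD (m : Nat) "").toList) = (lowOutTab.getD (m : Nat) "").toList := by decide

set_option maxRecDepth 100000 in
set_option maxHeartbeats 4000000 in
theorem Bhigh : ∀ C ∈ keys28, ∀ m : Fin 100,
    Bcore C ((m : Nat) : Int) =
      String.ofList ((numAt C).toList ++ (centoOutTab.getD (m : Nat) "").toList) := by decide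

set_option maxRecDepth 100000 in
set_option maxHeartbeats 1000000 in
theorem Blow : ∀ m : Fin 100,
    Bcore 0 ((m : Nat) : Int) = String.ofList ((lowOutTab.getD (m : Nat) "").toList) := by decide

set_option maxHeartbeats 1000000 in
theorem coreMain : ∀ C, C ∈ ((0 : Int) :: keys28) → ∀ m : Fin 100,
    Acore C ((m : Nat) : Int) = Bcore C ((m : Nat) : Int) := by
  intro C hC m
  rw [Acore_eq, glow_tab m, elfold_bridge]
  rcases List.mem_cons.mp hC with h0 | hk
  · subst h0
    rw [Blow m]
    have ht : (hundS 0 ++ lowTab.getD (m : Nat) "").toList = (lowTab.getD (m : Nat) "").toList := by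
      simp [hundS]
    rw [ht, low_out m]
  · have hC0 : C ≠ 0 := ne0 C hk
    rw [Bhigh C hk m]
    have ht : (hundS C ++ lowTab.getD (m : Nat) "").toList
        = (numAt C).toList ++ (centoL ++ (lowTab.getD (m : Nat) "").toList) := by
      simp [hundS, hC0, ← centoS]
    rw [ht]
    have hcc := chain_cento m
    rw [Bool.and_eq_true] at hcc
    obtain ⟨hchain, hval⟩ := hcc
    rw [show elfoldC ((numAt C).toList ++ (centoL ++ (lowTab.getD (m : Nat) "").toList))
          = (numAt C).toList ++ elfoldC (centoL ++ (lowTab.getD (m : Nat) "").toList) from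
        fold_peel (numAt C).toList patsC _ (windowAll C hk) hchain]
    rw [eq_of_beq hval]

-- ===== VERDICT (by name: the statement is the Claim_ definition above) =====
set_option maxHeartbeats 1000000 in
theorem convertiMille_spec : Claim_equal_convertiMille := by
  intro N _ hpre
  unfold Spec_convertiMille
  rw [A_factor, B_factor]
  have h0 : 0 ≤ PySem.Int.mod N 100 := PySem.Int.mod_nonneg N (by norm_num)
  have h1 : PySem.Int.mod N 100 < 100 := PySem.Int.mod_lt N (by norm_num)
  obtain ⟨m, hm⟩ := Int.eq_ofNat_of_zero_le h0
  have hmlt : m < 100 := by omega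
  have hmem : PySem.Int.floordiv N 100 ∈ ((0 : Int) :: keys28) := hpre
  rw [hm]
  exact coreMain (PySem.Int.floordiv N 100) hmem ⟨m, hmlt⟩
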